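-- pv_equiv track=rewrite | github.com/JorgedelValleV/computational-algebra | actividad3-jorge-delValleVazquez.py | es_posible_ganar_con_n_piedras
-- ===== SOURCE A (Python) =====
-- def  es_posible_ganar_con_n_piedras(n):
--     lista = [False]*(n)
--     for i in range(n):
--         if i ==0 :
--             pass
--         elif i>0 and i<6:
--             if lista[i-2]==False or lista[i-1]==False:
--                 lista[i]=True
--         else:       #i>=6
--             if lista[i-6]==False or lista[i-2]==False or lista[i-1]==False:
--                 lista[i]=True
--     return lista[n-1]
-- ===== SOURCE B (Python) =====
-- def es_posible_ganar_con_n_piedras(n):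
--     # Sprague-Grundy win/lose sequence of the {1,2,6} subtraction game is
--     # periodic with period 7; losing positions are those with index % 7 in {0, 3}.
--     return (n - 1) % 7 not in (0, 3)
-- ===== Notes on version B (the rewrite author's own statement) =====
-- stated objective: faster
-- what changed: Replaces the O(n) dynamic-programming table over all positions by a constant-time modular test, using the period-7 pattern of the {1,2,6} subtraction game (losing exactly when (n-1) % 7 is 0 or 3).
import Mathlib
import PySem

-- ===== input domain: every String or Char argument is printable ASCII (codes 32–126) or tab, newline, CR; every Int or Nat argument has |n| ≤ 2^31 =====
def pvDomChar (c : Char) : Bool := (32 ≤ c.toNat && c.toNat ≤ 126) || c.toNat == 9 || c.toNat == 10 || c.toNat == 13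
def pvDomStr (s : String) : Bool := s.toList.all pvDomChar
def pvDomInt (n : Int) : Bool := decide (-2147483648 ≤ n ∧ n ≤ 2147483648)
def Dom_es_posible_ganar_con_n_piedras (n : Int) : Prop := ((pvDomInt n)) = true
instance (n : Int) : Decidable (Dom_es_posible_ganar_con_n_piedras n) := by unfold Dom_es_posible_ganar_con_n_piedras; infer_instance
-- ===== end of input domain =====

-- B replaces A's O(n) win/lose table by a constant-time modular test (period-7 Sprague-Grundy
-- pattern of the {1,2,6} subtraction game); return values agree for every n ≥ 1 (A raises for n ≤ 0).


-- ===== PORT A =====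
-- the body of A's for-loop (the if/elif/else on index i)
def pvStepA (l : List Bool) (i : Int) : List Bool :=
  if i = 0 then l
  else if i > 0 ∧ i < 6 then
    if PySem.List.pyGetD l (i-2) false = false ∨ PySem.List.pyGetD l (i-1) false = false then
      PySem.List.pySetD l i true
    else l
  else
    if PySem.List.pyGetD l (i-6) false = false ∨ PySem.List.pyGetD l (i-2) false = false
        ∨ PySem.List.pyGetD l (i-1) false = false then
      PySem.List.pySetD l i true
    else l

-- indexing via the total pyGetD/pySetD forms is exact here: inside the loop every index is in
-- range (including Python's negative-index read lista[-1] at i = 1), and Pre_ puts lista[n-1] in range.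
def es_posible_ganar_con_n_piedras (n : Int) : Bool :=
  let lista := List.replicate n.toNat false
  let lista := (PySem.List.pyRange 0 n 1).foldl pvStepA lista
  PySem.List.pyGetD lista (n - 1) false

-- ===== PORT B =====
def es_posible_ganar_con_n_piedras_alt (n : Int) : Bool :=
  let r := PySem.Int.mod (n - 1) 7
  !(r == 0 || r == 3)

-- ===== PRECONDITION & SPEC =====
-- Pre_ excludes exactly n ≤ 0, where A raises IndexError (lista[n-1] on an empty list).
def Pre_es_posible_ganar_con_n_piedras (n : Int) : Prop := 1 ≤ n
instance (n : Int) : Decidable (Pre_es_posible_ganar_con_n_piedras n) := by unfold Pre_es_posible_ganar_con_n_piedras; infer_instance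
def pvWitness_es_posible_ganar_con_n_piedras : Int := 8

def Spec_es_posible_ganar_con_n_piedras (n : Int) (out : Bool) : Prop := out = es_posible_ganar_con_n_piedras_alt n
instance (n : Int) (out : Bool) : Decidable (Spec_es_posible_ganar_con_n_piedras n out) := by unfold Spec_es_posible_ganar_con_n_piedras; infer_instance

-- ===== CLAIM (what is proved, stated in full; the proofs are below) =====
def Claim_equal_es_posible_ganar_con_n_piedras : Prop := ∀ (n : Int), Dom_es_posible_ganar_con_n_piedras n → Pre_es_posible_ganar_con_n_piedras n → Spec_es_posible_ganar_con_n_piedras n (es_posible_ganar_con_n_piedras n)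

-- ===== LEMMAS AND PROOFS =====

-- the win/lose pattern A's table computes: position j is winning iff j % 7 ∉ {0, 3}
def pvPat (j : Nat) : Bool := !(j % 7 == 0 || j % 7 == 3)

theorem pvPat_rec6 (i : Nat) (h : 6 ≤ i) :
    pvPat i = true ↔ (pvPat (i-6) = false ∨ pvPat (i-2) = false ∨ pvPat (i-1) = false) := by
  have h1 : (i-1) % 7 = (i % 7 + 6) % 7 := by omega
  have h2 : (i-2) % 7 = (i % 7 + 5) % 7 := by omega
  have h6 : (i-6) % 7 = (i % 7 + 1) % 7 := by omega
  have hr : i % 7 = 0 ∨ i%7=1 ∨ i%7=2 ∨ i%7=3 ∨ i%7=4 ∨ i%7=5 ∨ i%7=6 := by omega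
  rcases hr with h|h|h|h|h|h|h <;> simp [pvPat, h1, h2, h6, h]

theorem pvPat_rec_small (i : Nat) (h2 : 2 ≤ i) (h5 : i < 6) :
    pvPat i = true ↔ (pvPat (i-2) = false ∨ pvPat (i-1) = false) := by
  interval_cases i <;> decide

theorem pvGetP (i k : Nat) (T : List Bool) (hk : k < i) :
    PySem.List.pyGetD ((List.range i).map pvPat ++ T) (k : Int) false = pvPat k := by
  rw [PySem.List.pyGetD_natCast]
  have hlen : k < ((List.range i).map pvPat).length := by simpa using hk
  simp [List.getD, List.getElem?_append_left hlen, List.getElem?_map, List.getElem?_range hk]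

theorem pvStepA_step (m i : Nat) (h : i < m) :
    pvStepA ((List.range i).map pvPat ++ List.replicate (m - i) false) (i : Int)
      = (List.range (i+1)).map pvPat ++ List.replicate (m - (i+1)) false := by
  set P := (List.range i).map pvPat with hPdef
  have hP : P.length = i := by simp [hPdef]
  have hrep : List.replicate (m - i) false = false :: List.replicate (m - (i+1)) false := by
    rw [← List.replicate_succ]; congr 1; omega
  set T := List.replicate (m - (i+1)) false with hTdef
  have hR : (List.range (i+1)).map pvPat = P ++ [pvPat i] := by
    simp [List.range_succ, hPdef]
  rw [hrep, hR]
  have hset : PySem.List.pySetD (P ++ false :: T) (i : Int) true = P ++ true :: T := by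
    rw [PySem.List.pySetD_natCast, ← hP]; simp
  rcases Nat.eq_zero_or_pos i with hi0 | hipos
  · subst hi0; simp only [pvStepA, Nat.cast_zero]; simp [hPdef]; decide
  rcases Nat.lt_or_ge i 2 with hi1 | hi2
  · -- i = 1
    have : i = 1 := by omega
    subst this
    have hc : PySem.List.pyGetD (P ++ false :: T) (((1:Nat):Int)-1) false = false := by
      have e : (((1:Nat):Int)-1) = ((0:Nat):Int) := by norm_num
      rw [e, pvGetP 1 0 _ (by omega)]; decide
    simp only [pvStepA]
    rw [if_neg (by norm_num), if_pos (by constructor <;> norm_num),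
        if_pos (Or.inr hc), hset]
    simp
    decide
  rcases Nat.lt_or_ge i 6 with hi5 | hi6
  · -- 2 ≤ i < 6
    have e2 : ((i:Int) - 2) = ((i-2 : Nat) : Int) := by omega
    have e1 : ((i:Int) - 1) = ((i-1 : Nat) : Int) := by omega
    simp only [pvStepA]
    rw [if_neg (by omega), if_pos (by constructor <;> omega),
        e2, e1, pvGetP i (i-2) _ (by omega), pvGetP i (i-1) _ (by omega)]
    by_cases hc : pvPat (i-2) = false ∨ pvPat (i-1) = false
    · rw [if_pos hc, hset]
      have : pvPat i = true := (pvPat_rec_small i hi2 hi5).mpr hc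
      simp [this]
    · rw [if_neg hc]
      have : pvPat i = false := by
        rcases Bool.eq_false_or_eq_true (pvPat i) with h'|h'
        · exact absurd ((pvPat_rec_small i hi2 hi5).mp h') hc
        · exact h'
      simp [this]
  · -- 6 ≤ i
    have e6 : ((i:Int) - 6) = ((i-6 : Nat) : Int) := by omega
    have e2 : ((i:Int) - 2) = ((i-2 : Nat) : Int) := by omega
    have e1 : ((i:Int) - 1) = ((i-1 : Nat) : Int) := by omega
    simp only [pvStepA]
    rw [if_neg (by omega), if_neg (by omega),
        e6, e2, e1, pvGetP i (i-6) _ (by omega), pvGetP i (i-2) _ (by omega),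
        pvGetP i (i-1) _ (by omega)]
    by_cases hc : pvPat (i-6) = false ∨ pvPat (i-2) = false ∨ pvPat (i-1) = false
    · rw [if_pos hc, hset]
      have : pvPat i = true := (pvPat_rec6 i hi6).mpr hc
      simp [this]
    · rw [if_neg hc]
      have : pvPat i = false := by
        rcases Bool.eq_false_or_eq_true (pvPat i) with h'|h'
        · exact absurd ((pvPat_rec6 i hi6).mp h') hc
        · exact h'
      simp [this]

theorem pvCastBeq (a c : Nat) : ((a:Int) == (c:Int)) = (a == c) := by
  by_cases h : a = c <;> simp [h]

theorem pvInv (m i : Nat) (h : i ≤ m) :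
    ((List.range i).map (fun k => ((k : Nat) : Int))).foldl pvStepA (List.replicate m false)
      = (List.range i).map pvPat ++ List.replicate (m - i) false := by
  induction i with
  | zero => simp
  | succ i ih =>
    rw [List.range_succ, List.map_append, List.foldl_append, ih (by omega)]
    simp only [List.map_cons, List.map_nil, List.foldl_cons, List.foldl_nil]
    have hstep := pvStepA_step m i (by omega)
    rw [List.range_succ] at hstep
    exact hstep

theorem es_posible_ganar_con_n_piedras_spec : Claim_equal_es_posible_ganar_con_n_piedras := by
  intro n _hdom hpre
  unfold Pre_es_posible_ganar_con_n_piedras at hpre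
  unfold Spec_es_posible_ganar_con_n_piedras
  obtain ⟨m, rfl⟩ : ∃ m : Nat, n = (m:Int) := ⟨n.toNat, by omega⟩
  have hm : 1 ≤ m := by exact_mod_cast hpre
  unfold es_posible_ganar_con_n_piedras es_posible_ganar_con_n_piedras_alt
  have hrange : PySem.List.pyRange 0 (m:Int) 1 = (List.range m).map (fun k => ((k:Nat):Int)) := by
    rw [PySem.List.pyRange_one]; simp
  simp only [hrange, Int.toNat_natCast]
  rw [pvInv m m le_rfl]
  have e1 : ((m:Int) - 1) = ((m-1 : Nat) : Int) := by omega
  rw [e1, PySem.List.pyGetD_natCast]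
  have hget : (List.map pvPat (List.range m) ++ List.replicate (m-m) false).getD (m-1) false = pvPat (m-1) := by
    simp [List.getD, List.getElem?_map, List.getElem?_range (by omega : m - 1 < m)]
  rw [hget]
  have hmod : PySem.Int.mod (((m-1:Nat)) : Int) 7 = (((m-1) % 7 : Nat) : Int) := by
    exact_mod_cast PySem.Int.mod_natCast (m-1) 7
  rw [hmod]
  simp only [pvPat]
  rw [show (0:Int) = ((0:Nat):Int) from rfl, show (3:Int) = ((3:Nat):Int) from rfl,
    pvCastBeq, pvCastBeq]
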